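-- pv_equiv track=rewrite | github.com/DayStayyy/ReadmeGenerator | IntelligentChunker.py | _extract_main_block
-- ===== SOURCE A (Python) =====
-- def _extract_main_block(content: str) -> str:
--     """Extrait le bloc if __name__ == "__main__" """
--     lines = content.splitlines()
--     main_lines = []
--     in_main_block = False
--
--     for line in lines:
--         if 'if __name__ == "__main__"' in line:
--             in_main_block = True
--             main_lines.append(line)
--         elif in_main_block:
--             if line.strip() and not line.startswith(' ') and not line.startswith('\t'):
--                 # Fin du bloc main
--                 break
--             main_lines.append(line)
--
--     return "\n".join(main_lines) if main_lines else ""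
-- ===== SOURCE B (Python) =====
-- MARKER = 'if __name__ == "__main__"'
--
--
-- def _is_terminator(line):
--     """A dedented, non-blank line ends the main block."""
--     return bool(line.strip()) and line[0] not in ' \t'
--
--
-- def _extract_main_block(content: str) -> str:
--     """Index-based: locate the guard line and the block's end, then slice."""
--     lines = content.splitlines()
--     starts = [i for i, line in enumerate(lines) if MARKER in line]
--     if not starts:
--         return ""
--     start = starts[0]
--     stops = [i for i, line in enumerate(lines) if i > start and _is_terminator(line)]
--     stop = stops[0] if stops else len(lines)
--     return "\n".join(lines[start:stop])
-- ===== Notes on version B (the rewrite author's own statement) =====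
-- stated objective: alternative
-- what changed: Replaces the flag-driven append/break loop by index arithmetic: compute the guard line's index and the end-of-block index with two enumerate comprehensions, then slice lines[start:stop] and join; Pre_ excludes contents whose guard marker occurs on more than one line, where A's merging of repeated guard lines into one block is an accident of its flag order and neither behaviour is specified.
import Mathlib
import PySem

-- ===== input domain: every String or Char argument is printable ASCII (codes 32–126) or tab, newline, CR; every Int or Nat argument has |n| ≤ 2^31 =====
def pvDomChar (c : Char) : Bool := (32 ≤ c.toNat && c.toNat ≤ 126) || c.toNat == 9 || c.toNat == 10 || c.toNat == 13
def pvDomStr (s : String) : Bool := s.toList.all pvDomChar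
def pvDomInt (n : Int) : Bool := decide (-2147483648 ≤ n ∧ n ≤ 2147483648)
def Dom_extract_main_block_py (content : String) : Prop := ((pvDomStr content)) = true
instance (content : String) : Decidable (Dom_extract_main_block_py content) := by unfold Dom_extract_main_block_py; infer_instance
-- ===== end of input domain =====

-- B locates the guard line and the end of the block by index (two enumerate scans), then slices; return value only, no mutation.

-- ===== PORT A =====
def pvMarker : String := "if __name__ == \"__main__\""

-- A's for-loop: state = (main_lines, in_main_block); 'break' returns the accumulator
def pvALoop (lines : List String) (mainLines : List String) (inMain : Bool) : List String :=
  match lines with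
  | [] => mainLines
  | l :: rest =>
    if PySem.Str.isIn pvMarker l then
      pvALoop rest (mainLines ++ [l]) true
    else if inMain then
      if PySem.Str.strip l ≠ "" ∧ ¬ PySem.Str.startswith l " " ∧ ¬ PySem.Str.startswith l "\t" then
        mainLines  -- break
      else
        pvALoop rest (mainLines ++ [l]) inMain
    else
      pvALoop rest mainLines inMain

def pvABody (lines : List String) : String :=
  let mainLines := pvALoop lines [] false
  if mainLines ≠ [] then PySem.Str.join "\n" mainLines else ""

def extract_main_block_py (content : String) : String :=
  pvABody (PySem.Str.splitlines content)

-- ===== PORT B =====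
-- _is_terminator: bool(line.strip()) and line[0] not in ' \t'
def pvIsTerminator (line : String) : Bool :=
  if PySem.Str.strip line ≠ "" then
    match PySem.Str.pyGet? line 0 with
    | some c => c ≠ ' ' && c ≠ '\t'   -- line[0] not in ' \t' (single char membership)
    | none => false                    -- unreachable: strip is non-empty
  else false

-- starts = [i for i, line in enumerate(lines) if MARKER in line]
def pvStarts (lines : List String) : List Int :=
  (PySem.List.enumerate lines 0).filterMap
    (fun il => if PySem.Str.isIn pvMarker il.2 then some il.1 else none)

-- stops = [i for i, line in enumerate(lines) if i > start and _is_terminator(line)]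
def pvStops (lines : List String) (start : Int) : List Int :=
  (PySem.List.enumerate lines 0).filterMap
    (fun il => if start < il.1 ∧ pvIsTerminator il.2 = true then some il.1 else none)

def pvBBody (lines : List String) : String :=
  match pvStarts lines with
  | [] => ""
  | start :: _ =>
    let stop : Int :=
      match pvStops lines start with
      | [] => (lines.length : Int)
      | s :: _ => s
    PySem.Str.join "\n" (PySem.List.slice lines (some start) (some stop))

def extract_main_block_py_alt (content : String) : String :=
  pvBBody (PySem.Str.splitlines content)

-- ===== PRECONDITION & SPEC =====
-- Pre_ excludes contents whose guard marker occurs on more than one line: there A's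
-- merging of repeated guard lines into one block is an accident of checking the marker
-- before the in-block flag, and neither behaviour is specified.
def Pre_extract_main_block_py (content : String) : Prop :=
  (PySem.Str.splitlines content).countP (fun l => PySem.Str.isIn pvMarker l) ≤ 1
instance (content : String) : Decidable (Pre_extract_main_block_py content) := by
  unfold Pre_extract_main_block_py; infer_instance

def pvWitness_extract_main_block_py : String :=
  "x = 1\nif __name__ == \"__main__\":\n    main()\nprint(2)"

def Spec_extract_main_block_py (content : String) (out : String) : Prop :=
  out = extract_main_block_py_alt content
instance (content : String) (out : String) : Decidable (Spec_extract_main_block_py content out) := by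
  unfold Spec_extract_main_block_py; infer_instance

-- ===== CLAIM =====
def Claim_equal_extract_main_block_py : Prop :=
  ∀ (content : String), Dom_extract_main_block_py content →
    Pre_extract_main_block_py content →
    Spec_extract_main_block_py content (extract_main_block_py content)

-- ===== LEMMAS AND PROOFS =====

-- continuation test of A, as one Bool
def pvCont (l : String) : Bool :=
  !(PySem.Str.strip l ≠ "" ∧ ¬ PySem.Str.startswith l " " ∧ ¬ PySem.Str.startswith l "\t" : Bool)

-- B's terminator is the negation of A's continuation test
theorem pvIsTerminator_eq (l : String) : pvIsTerminator l = !pvCont l := by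
  unfold pvIsTerminator pvCont
  by_cases hs : PySem.Str.strip l = ""
  · simp [hs]
  · simp [hs]
    cases hcs : l.toList with
    | nil =>
      exfalso; apply hs
      simp [PySem.Str.strip, hcs]
      decide
    | cons c cs =>
      simp [PySem.Chars.startswith, List.isPrefixOf]
      by_cases h1 : c = ' ' <;> by_cases h2 : c = '\t' <;> simp [h1, h2]
      exact ⟨Ne.symm h1, Ne.symm h2⟩

-- indices produced by an enumerate-filterMap are ≥ the start offset
theorem pvIdxMemGe (xs : List String) (k : Int) (q : Int → String → Bool) :
    ∀ s ∈ (PySem.List.enumerate xs k).filterMap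
        (fun il => if q il.1 il.2 = true then some il.1 else none), k ≤ s := by
  induction xs generalizing k with
  | nil => simp [PySem.List.enumerate_nil]
  | cons x xs ih =>
    intro s hs
    rw [PySem.List.enumerate_cons] at hs
    simp only [List.filterMap_cons] at hs
    by_cases hq : q k x = true
    · rw [if_pos hq] at hs
      rcases List.mem_cons.mp hs with h | h
      · omega
      · have := ih (k+1) s h; omega
    · rw [if_neg hq] at hs
      have := ih (k+1) s hs; omega

-- shift lemma for enumerate-filterMaps
theorem pvEnumShift (xs : List String) (k : Int) (q : Int → String → Bool) :
    (PySem.List.enumerate xs (k+1)).filterMap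
        (fun il => if q il.1 il.2 = true then some il.1 else none)
    = ((PySem.List.enumerate xs k).filterMap
        (fun il => if q (il.1+1) il.2 = true then some il.1 else none)).map (· + 1) := by
  induction xs generalizing k with
  | nil => simp [PySem.List.enumerate_nil]
  | cons x xs ih =>
    rw [PySem.List.enumerate_cons, PySem.List.enumerate_cons]
    simp only [List.filterMap_cons]
    by_cases hq : q (k+1) x = true
    · simp [hq, ih (k+1)]
    · simp [hq, ih (k+1)]

-- first-terminator indices (offset 0, no lower bound)
def pvTermIdx (xs : List String) : List Int :=
  (PySem.List.enumerate xs 0).filterMap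
    (fun il => if pvIsTerminator il.2 = true then some il.1 else none)

theorem pvStarts_cons (l : String) (rest : List String) :
    pvStarts (l :: rest)
      = (if PySem.Str.isIn pvMarker l then [(0:Int)] else []) ++ (pvStarts rest).map (· + 1) := by
  have hsh := pvEnumShift rest 0 (fun _ l => PySem.Str.isIn pvMarker l)
  norm_num at hsh
  unfold pvStarts
  rw [PySem.List.enumerate_cons]
  simp only [List.filterMap_cons]
  by_cases hm : PySem.Str.isIn pvMarker l
  all_goals simp at hm
  · simp [hm, hsh]
  · simp [hm, hsh]

theorem pvEnumFstGe (xs : List String) (k : Int) :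
    ∀ il ∈ PySem.List.enumerate xs k, k ≤ il.1 := by
  induction xs generalizing k with
  | nil => simp [PySem.List.enumerate_nil]
  | cons x xs ih =>
    intro il hil
    rw [PySem.List.enumerate_cons] at hil
    rcases List.mem_cons.mp hil with h | h
    · simp [h]
    · have := ih (k+1) il h; omega

theorem pvStops_zero_cons (l : String) (rest : List String) :
    pvStops (l :: rest) 0 = (pvTermIdx rest).map (· + 1) := by
  have hsh := pvEnumShift rest 0 (fun i l => decide (0 < i ∧ pvIsTerminator l = true))
  simp only [decide_eq_true_eq] at hsh
  norm_num at hsh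
  unfold pvStops pvTermIdx
  rw [PySem.List.enumerate_cons]
  simp only [List.filterMap_cons]
  norm_num
  rw [hsh]
  congr 1
  apply List.filterMap_congr
  intro il hil
  have h0 := pvEnumFstGe rest 0 il hil
  simp [h0]

theorem pvStops_succ_cons (l : String) (rest : List String) (s : Int) (hs : 0 ≤ s) :
    pvStops (l :: rest) (s + 1) = (pvStops rest s).map (· + 1) := by
  have hsh := pvEnumShift rest 0 (fun i l => decide (s + 1 < i ∧ pvIsTerminator l = true))
  simp only [decide_eq_true_eq] at hsh
  norm_num at hsh
  unfold pvStops
  rw [PySem.List.enumerate_cons]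
  simp only [List.filterMap_cons]
  have hneg : ¬ (s + 1 < (0:Int) ∧ pvIsTerminator l = true) := by
    rintro ⟨h, -⟩; omega
  rw [if_neg hneg]
  norm_num
  rw [hsh]

theorem pvTermIdx_cons (x : String) (xs : List String) :
    pvTermIdx (x :: xs)
      = (if pvIsTerminator x then [(0:Int)] else []) ++ (pvTermIdx xs).map (· + 1) := by
  have hsh := pvEnumShift xs 0 (fun _ l => pvIsTerminator l)
  norm_num at hsh
  unfold pvTermIdx
  rw [PySem.List.enumerate_cons]
  simp only [List.filterMap_cons]
  by_cases ht : pvIsTerminator x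
  · simp [ht, hsh]
  · simp [ht, hsh]

-- the take governed by the first terminator index is the takeWhile of continuations
theorem pvTermIdx_take (xs : List String) :
    (match pvTermIdx xs with
     | [] => xs
     | s :: _ => xs.take s.toNat) = xs.takeWhile pvCont := by
  induction xs with
  | nil => simp [pvTermIdx, PySem.List.enumerate_nil]
  | cons x xs ih =>
    rw [pvTermIdx_cons]
    by_cases ht : pvIsTerminator x
    · have hc : pvCont x = false := by
        have := pvIsTerminator_eq x
        rw [ht] at this
        cases h : pvCont x <;> simp [h] at this ⊢
      simp [ht, hc]
    · have hc : pvCont x = true := by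
        have := pvIsTerminator_eq x
        cases h : pvCont x
        · rw [h] at this
          simp at this
          exact absurd this ht
        · rfl
      simp [ht]
      rw [List.takeWhile_cons, hc]
      cases hti : pvTermIdx xs with
      | nil =>
        rw [hti] at ih
        simpa using congrArg (List.cons x) ih
      | cons s t =>
        have hs0 : (0:Int) ≤ s := by
          apply pvIdxMemGe xs 0 (fun _ l => pvIsTerminator l)
          unfold pvTermIdx at hti
          rw [hti]; exact List.mem_cons_self ..
        rw [hti] at ih
        simp only [List.map_cons]
        have htoNat : ((s + 1).toNat) = s.toNat + 1 := by omega
        rw [htoNat, List.take_succ_cons]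
        exact congrArg (List.cons x) ih

-- A in the block, no further marker: it appends exactly the continuation prefix
theorem pvALoop_true (rest : List String) (acc : List String)
    (h : ∀ x ∈ rest, PySem.Str.isIn pvMarker x = false) :
    pvALoop rest acc true = acc ++ rest.takeWhile pvCont := by
  induction rest generalizing acc with
  | nil => simp [pvALoop]
  | cons l rest ih =>
    have hl : PySem.Str.isIn pvMarker l = false := h l (List.mem_cons_self ..)
    have hrest : ∀ x ∈ rest, PySem.Str.isIn pvMarker x = false :=
      fun x hx => h x (List.mem_cons_of_mem _ hx)
    rw [pvALoop, List.takeWhile_cons]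
    rw [if_neg (by simp only [Bool.not_eq_true]; simpa using hl)]
    by_cases hb : PySem.Str.strip l ≠ "" ∧ ¬ PySem.Str.startswith l " " ∧ ¬ PySem.Str.startswith l "\t"
    · have hc : pvCont l = false := by unfold pvCont; rw [decide_eq_true hb]; rfl
      rw [if_pos hb]
      simp [hc]
    · have hc : pvCont l = true := by unfold pvCont; rw [decide_eq_false hb]; rfl
      rw [if_neg hb]
      simp [hc, ih (acc ++ [l]) hrest]

theorem pvStops_nonneg (xs : List String) (st : Int) :
    ∀ p ∈ pvStops xs st, (0:Int) ≤ p := by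
  intro p hp
  unfold pvStops at hp
  obtain ⟨il, hil, hif⟩ := List.mem_filterMap.mp hp
  have h0 := pvEnumFstGe xs 0 il hil
  split_ifs at hif
  have := Option.some.inj hif
  omega

theorem pvSliceShift (l : String) (xs : List String) (a b : Int) (ha : 0 ≤ a) (hb : 0 ≤ b) :
    PySem.List.slice (l :: xs) (some (a+1)) (some (b+1)) = PySem.List.slice xs (some a) (some b) := by
  rw [PySem.List.slice_toNat _ (by omega) (by omega), PySem.List.slice_toNat _ ha hb]
  have h1 : (a+1).toNat = a.toNat + 1 := by omega
  have h2 : (b+1).toNat = b.toNat + 1 := by omega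
  rw [h1, h2, List.drop_succ_cons]
  congr 1
  omega

theorem pvSliceZero (l : String) (xs : List String) (b : Int) (hb : 0 ≤ b) :
    PySem.List.slice (l :: xs) (some 0) (some b) = (l :: xs).take b.toNat := by
  rw [PySem.List.slice_toNat _ le_rfl hb]
  simp

theorem pvMain (lines : List String)
    (h : lines.countP (fun l => PySem.Str.isIn pvMarker l) ≤ 1) :
    pvABody lines = pvBBody lines := by
  induction lines with
  | nil => simp [pvABody, pvBBody, pvALoop, pvStarts, PySem.List.enumerate_nil]
  | cons l rest ih =>
    by_cases hm : PySem.Str.isIn pvMarker l = true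
    · -- the guard line is at the head
      have hcnt : rest.countP (fun l => PySem.Str.isIn pvMarker l) = 0 := by
        rw [List.countP_cons, if_pos hm] at h
        omega
      have hrest : ∀ x ∈ rest, PySem.Str.isIn pvMarker x = false := by
        intro x hx
        have := List.countP_eq_zero.mp hcnt x hx
        simpa using this
      have hA : pvABody (l :: rest)
          = PySem.Str.join "\n" (l :: rest.takeWhile pvCont) := by
        have hstep : pvALoop (l :: rest) [] false = [l] ++ rest.takeWhile pvCont := by
          rw [pvALoop, if_pos hm]
          simpa using pvALoop_true rest [l] hrest
        have h2 := congrArg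
          (fun ml => if ml ≠ [] then PySem.Str.join "\n" ml else "") hstep
        exact h2.trans (by simp)
      rw [hA]
      unfold pvBBody
      rw [pvStarts_cons, if_pos hm]
      simp only [List.cons_append, List.nil_append]
      rw [pvStops_zero_cons]
      cases hti : pvTermIdx rest with
      | nil =>
        have htw := pvTermIdx_take rest
        rw [hti] at htw
        simp only [List.map_nil]
        rw [pvSliceZero _ _ _ (by positivity)]
        have hlen : ((l :: rest).length : Int).toNat = rest.length + 1 := by simp
        rw [hlen, List.take_succ_cons, List.take_length]
        have htw' : rest = rest.takeWhile pvCont := htw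
        exact congrArg (fun xs => PySem.Str.join "\n" (l :: xs)) htw'.symm
      | cons s t =>
        have hs0 : (0:Int) ≤ s := by
          apply pvIdxMemGe rest 0 (fun _ l => pvIsTerminator l)
          unfold pvTermIdx at hti
          rw [hti]; exact List.mem_cons_self ..
        have htw := pvTermIdx_take rest
        rw [hti] at htw
        simp only [List.map_cons]
        rw [pvSliceZero _ _ _ (by omega)]
        have hsn : (s + 1).toNat = s.toNat + 1 := by omega
        rw [hsn, List.take_succ_cons]
        have htw' : rest.take s.toNat = rest.takeWhile pvCont := htw
        exact congrArg (fun xs => PySem.Str.join "\n" (l :: xs)) htw'.symm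
    · -- no guard at the head: both sides reduce to the tail
      have hm' : PySem.Str.isIn pvMarker l = false := by
        cases hmm : PySem.Str.isIn pvMarker l
        · rfl
        · exact absurd hmm hm
      have hcnt : rest.countP (fun l => PySem.Str.isIn pvMarker l) ≤ 1 := by
        rw [List.countP_cons, if_neg hm] at h
        omega
      have hmc : PySem.Chars.isIn pvMarker.toList l.toList = false := by
        simpa using hm'
      have hA : pvABody (l :: rest) = pvABody rest := by
        have hstep : pvALoop (l :: rest) [] false = pvALoop rest [] false := by
          rw [pvALoop, if_neg (by simp [hmc])]
          simp
        exact congrArg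
          (fun ml => if ml ≠ [] then PySem.Str.join "\n" ml else "") hstep
      rw [hA, ih hcnt]
      unfold pvBBody
      rw [pvStarts_cons, if_neg (by simp [hmc])]
      simp only [List.nil_append]
      cases hst : pvStarts rest with
      | nil => simp
      | cons s t =>
        have hs0 : (0:Int) ≤ s := by
          apply pvIdxMemGe rest 0 (fun _ l => PySem.Str.isIn pvMarker l)
          unfold pvStarts at hst
          rw [hst]; exact List.mem_cons_self ..
        simp only [List.map_cons]
        rw [pvStops_succ_cons _ _ _ hs0]
        cases hsp : pvStops rest s with
        | nil =>
          simp only [List.map_nil]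
          have hlen : ((l :: rest).length : Int) = (rest.length : Int) + 1 := by
            simp
          rw [hlen, pvSliceShift _ _ _ _ hs0 (by positivity)]
        | cons p q =>
          have hp0 : (0:Int) ≤ p := by
            apply pvStops_nonneg rest s
            rw [hsp]; exact List.mem_cons_self ..
          simp only [List.map_cons]
          rw [pvSliceShift _ _ _ _ hs0 hp0]

-- ===== VERDICT =====
theorem extract_main_block_py_spec : Claim_equal_extract_main_block_py := by
  intro content _ hpre
  show extract_main_block_py content = extract_main_block_py_alt content
  exact pvMain (PySem.Str.splitlines content) hpre
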